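-- pv_equiv track=rewrite | github.com/Parables/ufcfvq-assignment | fr3.py | min_max_count
-- ===== SOURCE A (Python) =====
-- def min_max_count(iterable):
--     it = iter(iterable)
--     min = next(it)
--     max = min
--
--     for x in it:
--         if(x < min):
--             min = x
--         elif x > max:
--             max = x
--     return {
--         'min': min,
--         'min-count': iterable.count(min),
--         'max': max,
--         'max-count': iterable.count(max),
--     }
-- ===== SOURCE B (Python) =====
-- def min_max_count(iterable):
--     s = sorted(iterable)
--     mn = s[0]
--     mx = s[-1]
--     mn_count = 0
--     for x in s:
--         if x != mn:
--             break
--         mn_count += 1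
--     mx_count = 0
--     for x in reversed(s):
--         if x != mx:
--             break
--         mx_count += 1
--     return {
--         'min': mn,
--         'min-count': mn_count,
--         'max': mx,
--         'max-count': mx_count,
--     }
-- ===== Notes on version B (the rewrite author's own statement) =====
-- stated objective: alternative
-- what changed: B sorts the list once and reads min/max from the ends, counting their occurrences by scanning the equal run at each end, instead of A's min/max loop followed by two full .count() scans.
import Mathlib
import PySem

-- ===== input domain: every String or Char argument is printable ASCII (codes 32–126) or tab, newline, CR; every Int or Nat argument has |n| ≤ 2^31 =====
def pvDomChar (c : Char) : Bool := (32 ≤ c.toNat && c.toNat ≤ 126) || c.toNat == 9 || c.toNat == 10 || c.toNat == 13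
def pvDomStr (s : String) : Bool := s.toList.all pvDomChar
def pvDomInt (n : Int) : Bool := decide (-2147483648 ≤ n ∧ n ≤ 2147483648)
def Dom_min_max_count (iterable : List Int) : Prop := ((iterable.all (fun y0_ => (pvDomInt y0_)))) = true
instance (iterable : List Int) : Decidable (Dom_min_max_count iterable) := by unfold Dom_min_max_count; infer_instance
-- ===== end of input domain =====

-- B sorts once and reads min/max from the ends, counting each end's equal run,
-- instead of A's min/max loop plus two full .count() scans (objective: alternative).

-- ===== PORT A =====
-- A's loop: 'if x < min: min = x elif x > max: max = x', then two .count() scans.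
def min_max_count (iterable : List Int) : List (String × Int) :=
  match iterable with
  | [] => []  -- unreachable: Python's next(it) raises StopIteration, excluded by Pre_
  | a :: t =>
    let s := t.foldl (fun (s : Int × Int) x =>
      if x < s.1 then (x, s.2) else if x > s.2 then (s.1, x) else s) (a, a)
    [("min", s.1), ("min-count", PySem.List.count iterable s.1),
     ("max", s.2), ("max-count", PySem.List.count iterable s.2)]

-- ===== PORT B =====
-- B's 'for x in s: if x != v: break; c += 1' loop, scanning the leading equal run.
def pvRunLen : List Int → Int → Int
  | [], _ => 0
  | x :: r, v => if x ≠ v then 0 else pvRunLen r v + 1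

def min_max_count_alt (iterable : List Int) : List (String × Int) :=
  match PySem.List.sorted iterable (fun x => x) false with
  | [] => []  -- unreachable: Python's s[0] raises IndexError on empty, excluded by Pre_
  | a :: t =>
    let mn := a                                 -- s[0]
    let mx := (a :: t).getLast (by simp)        -- s[-1]
    [("min", mn), ("min-count", pvRunLen (a :: t) mn),
     ("max", mx), ("max-count", pvRunLen (a :: t).reverse mx)]

-- ===== PRECONDITION & SPEC =====
-- Pre_ excludes only the empty list, on which A raises StopIteration (B: IndexError).
def Pre_min_max_count (iterable : List Int) : Prop := iterable ≠ []
instance (iterable : List Int) : Decidable (Pre_min_max_count iterable) := by unfold Pre_min_max_count; infer_instance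
def pvWitness_min_max_count : List Int := [3, 1, 4, 1, 5]

def Spec_min_max_count (iterable : List Int) (out : List (String × Int)) : Prop := out = min_max_count_alt iterable
instance (iterable : List Int) (out : List (String × Int)) : Decidable (Spec_min_max_count iterable out) := by unfold Spec_min_max_count; infer_instance

-- ===== CLAIM (what is proved, stated in full; the proofs are below) =====
def Claim_equal_min_max_count : Prop := ∀ (iterable : List Int), Dom_min_max_count iterable → Pre_min_max_count iterable → Spec_min_max_count iterable (min_max_count iterable)

-- ===== LEMMAS AND PROOFS =====

theorem pv_foldl_min_le (t : List Int) (m : Int) : t.foldl min m ≤ m := by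
  induction t generalizing m with
  | nil => simp
  | cons x r ih => exact le_trans (ih (min m x)) (min_le_left _ _)

theorem pv_le_foldl_max (t : List Int) (m : Int) : m ≤ t.foldl max m := by
  induction t generalizing m with
  | nil => simp
  | cons x r ih => exact le_trans (le_max_left _ _) (ih (max m x))

theorem pv_foldl_min_mem (t : List Int) (m : Int) : t.foldl min m = m ∨ t.foldl min m ∈ t := by
  induction t generalizing m with
  | nil => simp
  | cons x r ih =>
    rcases ih (min m x) with h | h
    · rcases le_total m x with hle | hle
      · left; simpa [min_eq_left hle] using h
      · right; simp only [List.foldl]; rw [h]; simp [min_eq_right hle]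
    · right; simpa using Or.inr h

theorem pv_foldl_min_le_mem (t : List Int) (m : Int) : ∀ x ∈ t, t.foldl min m ≤ x := by
  induction t generalizing m with
  | nil => simp
  | cons y r ih =>
    intro x hx
    rcases List.mem_cons.mp hx with rfl | hx
    · exact le_trans (pv_foldl_min_le r (min m x)) (min_le_right _ _)
    · exact ih (min m y) x hx

theorem pv_mem_foldl_max (t : List Int) (m : Int) : t.foldl max m = m ∨ t.foldl max m ∈ t := by
  induction t generalizing m with
  | nil => simp
  | cons x r ih =>
    rcases ih (max m x) with h | h
    · rcases le_total x m with hle | hle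
      · left; simpa [max_eq_left hle] using h
      · right; simp only [List.foldl]; rw [h]; simp [max_eq_right hle]
    · right; simpa using Or.inr h

theorem pv_mem_le_foldl_max (t : List Int) (m : Int) : ∀ x ∈ t, x ≤ t.foldl max m := by
  induction t generalizing m with
  | nil => simp
  | cons y r ih =>
    intro x hx
    rcases List.mem_cons.mp hx with rfl | hx
    · exact le_trans (le_max_right _ _) (pv_le_foldl_max r (max m x))
    · exact ih (max m y) x hx

-- A's loop computes the componentwise min and max, provided m ≤ M initially.
theorem pv_loopA (t : List Int) (m M : Int) (h : m ≤ M) :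
    t.foldl (fun (s : Int × Int) x =>
      if x < s.1 then (x, s.2) else if x > s.2 then (s.1, x) else s) (m, M)
    = (t.foldl min m, t.foldl max M) := by
  induction t generalizing m M with
  | nil => rfl
  | cons x r ih =>
    simp only [List.foldl]
    by_cases h1 : x < m
    · rw [if_pos h1, ih x M (by omega)]
      refine Prod.ext ?_ ?_ <;> simp only
      · congr 1; omega
      · congr 1; omega
    · rw [if_neg h1]
      by_cases h2 : x > M
      · rw [if_pos h2, ih m x (by omega)]
        refine Prod.ext ?_ ?_ <;> simp only
        · congr 1; omega
        · congr 1; omega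
      · rw [if_neg h2, ih m M h]
        refine Prod.ext ?_ ?_ <;> simp only
        · congr 1; omega
        · congr 1; omega

-- In a list whose elements are all ≥ v and sorted ascending, the leading equal run is all copies of v.
theorem pv_runLen_eq_count (s : List Int) (v : Int)
    (hp : s.Pairwise (· ≤ ·)) (hge : ∀ x ∈ s, v ≤ x) :
    pvRunLen s v = PySem.List.count s v := by
  induction s with
  | nil => simp [pvRunLen, PySem.List.count_eq]
  | cons x r ih =>
    rw [List.pairwise_cons] at hp
    by_cases hx : x = v
    · subst hx
      have h := ih hp.2 (fun y hy => hge y (List.mem_cons_of_mem _ hy))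
      simp only [PySem.List.count_eq, List.count_cons] at h ⊢
      simp [pvRunLen, h]
    · have hvx : v < x := lt_of_le_of_ne (hge x List.mem_cons_self) (Ne.symm hx)
      have hr : (r.count v : Int) = 0 := by
        norm_cast
        rw [List.count_eq_zero]
        intro hv
        have := hp.1 v hv
        omega
      simp only [PySem.List.count_eq, List.count_cons, pvRunLen]
      simp at hr ⊢
      omega

-- Mirror image: all ≤ v and sorted descending.
theorem pv_runLen_eq_count_rev (s : List Int) (v : Int)
    (hp : s.Pairwise (fun a b => b ≤ a)) (hle : ∀ x ∈ s, x ≤ v) :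
    pvRunLen s v = PySem.List.count s v := by
  induction s with
  | nil => simp [pvRunLen, PySem.List.count_eq]
  | cons x r ih =>
    rw [List.pairwise_cons] at hp
    by_cases hx : x = v
    · subst hx
      have h := ih hp.2 (fun y hy => hle y (List.mem_cons_of_mem _ hy))
      simp only [PySem.List.count_eq, List.count_cons] at h ⊢
      simp [pvRunLen, h]
    · have hvx : x < v := lt_of_le_of_ne (hle x List.mem_cons_self) hx
      have hr : (r.count v : Int) = 0 := by
        norm_cast
        rw [List.count_eq_zero]
        intro hv
        have := hp.1 v hv
        omega
      simp only [PySem.List.count_eq, List.count_cons, pvRunLen]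
      simp at hr ⊢
      omega

-- In a pairwise-≤ list every element is at most the last one.
theorem pv_le_getLast (s : List Int) (h : s ≠ []) (hp : s.Pairwise (· ≤ ·)) :
    ∀ y ∈ s, y ≤ s.getLast h := by
  intro y hy
  obtain ⟨i, hi, hyi⟩ := List.mem_iff_getElem.mp hy
  rw [List.getLast_eq_getElem, ← hyi]
  rcases Nat.lt_or_ge i (s.length - 1) with hlt | hge
  · exact (List.pairwise_iff_getElem.mp hp) i (s.length - 1) hi (by omega) hlt
  · have : i = s.length - 1 := by omega
    subst this; exact le_refl _

-- ===== VERDICT (by name: the statement is the Claim_ definition above) =====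
theorem min_max_count_spec : Claim_equal_min_max_count := by
  intro iterable _ hpre
  unfold Spec_min_max_count
  match hl : iterable with
  | [] => exact absurd rfl hpre
  | a :: t =>
    have hperm : (PySem.List.sorted (a :: t) (fun x => x) false).Perm (a :: t) :=
      PySem.List.sorted_perm _ _ _
    have hpw0 : (PySem.List.sorted (a :: t) (fun x => x) false).Pairwise (· ≤ ·) := by
      simpa using PySem.List.sorted_pairwise (xs := a :: t) (key := fun x => x)
    match hs : PySem.List.sorted (a :: t) (fun x => x) false with
    | [] =>
      rw [hs] at hperm
      exact absurd hperm.symm.eq_nil (by simp)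
    | b :: u =>
      rw [hs] at hperm hpw0
      simp only [min_max_count, min_max_count_alt, hs]
      rw [pv_loopA t a a le_rfl]
      have hb_le : ∀ y ∈ b :: u, b ≤ y := by
        intro y hy
        rcases List.mem_cons.mp hy with rfl | hy
        · exact le_refl _
        · exact (List.pairwise_cons.mp hpw0).1 y hy
      have hlast_ge := pv_le_getLast (b :: u) (by simp) hpw0
      -- b = foldl min
      have hmin_eq : b = t.foldl min a := by
        apply le_antisymm
        · apply hb_le
          apply hperm.mem_iff.mpr
          rcases pv_foldl_min_mem t a with h | h
          · rw [h]; exact List.mem_cons_self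
          · exact List.mem_cons_of_mem _ h
        · rcases List.mem_cons.mp (hperm.mem_iff.mp List.mem_cons_self) with h | h
          · rw [h]; exact pv_foldl_min_le t a
          · exact pv_foldl_min_le_mem t a b h
      -- getLast = foldl max
      have hmax_eq : (b :: u).getLast (by simp) = t.foldl max a := by
        apply le_antisymm
        · rcases List.mem_cons.mp (hperm.mem_iff.mp (List.getLast_mem _)) with h | h
          · rw [h]; exact pv_le_foldl_max t _
          · exact pv_mem_le_foldl_max t a _ h
        · apply hlast_ge
          apply hperm.mem_iff.mpr
          rcases pv_mem_foldl_max t a with h | h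
          · rw [h]; exact List.mem_cons_self
          · exact List.mem_cons_of_mem _ h
      -- counts agree via the permutation
      have hcnt_min : pvRunLen (b :: u) b = PySem.List.count (a :: t) b := by
        rw [pv_runLen_eq_count (b :: u) b hpw0 hb_le]
        simp only [PySem.List.count_eq, hperm.count_eq]
      have hcnt_max : pvRunLen (b :: u).reverse ((b :: u).getLast (by simp))
          = PySem.List.count (a :: t) ((b :: u).getLast (by simp)) := by
        rw [pv_runLen_eq_count_rev]
        · simp only [PySem.List.count_eq, List.count_reverse, hperm.count_eq]
        · rw [List.pairwise_reverse]; exact hpw0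
        · intro x hx
          exact hlast_ge x (List.mem_reverse.mp hx)
      rw [hcnt_min, hcnt_max, hmax_eq, hmin_eq]
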